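-- pv_equiv track=rewrite | github.com/HoI4-LOTRMod-Team/HoI4-LotrMod | tools/misc/fix_code_format.py | find_first_valid_closing_brace
-- ===== SOURCE A (Python) =====
-- def find_opening_brace(text, closing_brace_index):
--     if text[closing_brace_index] != '}':
--         raise ValueError("The character at the given index is not a closing brace '}'")
--
--     stack = 0
--
--     for i in range(closing_brace_index, -1, -1):
--         if text[i] == '}':
--             stack += 1
--         elif text[i] == '{':
--             stack -= 1
--
--         if stack == 0:
--             return i
--
--     raise ValueError("No corresponding opening brace '{' found")
--
-- def find_first_valid_closing_brace(text):
--     for i, char in enumerate(text):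
--         if char == '}':
--             opening_brace_index = find_opening_brace(text, i)
--             opening_brace_line_start = text.rfind('\n', 0, opening_brace_index) + 1
--             closing_brace_line_start = text.rfind('\n', 0, i) + 1
--
--             # Check if the opening brace is on the same line as the closing brace
--             if opening_brace_line_start == closing_brace_line_start:
--                 continue
--
--             # Check if the closing brace is the first non-whitespace/tab character on its line
--             if text[closing_brace_line_start:i].strip() == '':
--                 continue
--
--             return i
--
--     return -1
-- ===== SOURCE B (Python) =====
-- # Single forward pass: a stack of line-starts of unmatched '{' replaces A's
-- # backward re-scan per '}', and the current line start / line content are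
-- # tracked incrementally instead of rfind/slice+strip per '}'.
-- def find_first_valid_closing_brace(text):
--     stack = []
--     line_start = 0
--     has_content = False
--     for i, ch in enumerate(text):
--         if ch == '\n':
--             line_start = i + 1
--             has_content = False
--             continue
--         if ch == '{':
--             stack.append(line_start)
--         elif ch == '}':
--             open_line_start = stack.pop()
--             if open_line_start != line_start and has_content:
--                 return i
--         if not ch.isspace():
--             has_content = True
--     return -1
-- ===== Notes on version B (the rewrite author's own statement) =====
-- stated objective: alternative
-- what changed: A re-scans backwards from every '}' to find its matching '{' and recomputes both line starts with rfind plus a slice+strip per brace; B makes one forward pass keeping a stack of line-starts of unmatched '{', the current line start and a has-content flag, so braces are matched without any re-scan.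
-- outside the precondition, e.g. on find_first_valid_closing_brace('}'): A raises ValueError, B raises IndexError; on find_first_valid_closing_brace('{\n}}'): A raises ValueError, B raises IndexError
import Mathlib
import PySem

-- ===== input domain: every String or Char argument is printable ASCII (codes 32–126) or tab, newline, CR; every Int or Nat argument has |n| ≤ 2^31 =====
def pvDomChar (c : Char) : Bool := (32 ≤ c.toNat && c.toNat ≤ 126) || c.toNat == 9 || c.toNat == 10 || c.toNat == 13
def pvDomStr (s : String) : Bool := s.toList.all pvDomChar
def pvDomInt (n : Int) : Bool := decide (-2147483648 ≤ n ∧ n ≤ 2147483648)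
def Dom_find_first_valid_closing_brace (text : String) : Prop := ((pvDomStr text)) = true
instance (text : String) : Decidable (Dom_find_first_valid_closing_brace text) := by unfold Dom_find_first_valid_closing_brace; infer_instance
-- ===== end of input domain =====

-- B replaces A's per-'}' backward brace scan, rfind and slice/strip by one forward pass
-- with a stack of line-starts of unmatched '{' (alternative decomposition, no re-scans).

-- ===== PORT A =====
-- Loop counters/indices are the Nat positions of the enumerate/range loops; in-range
-- indexing text[i] is cs.getD i ' ' (every access A performs is in range).

-- 'for i in range(closing_brace_index, -1, -1)' with early return; stack is the int counter.
def fobGo (cs : List Char) : Nat → Int → Option Nat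
  | 0, st =>
    let c := cs.getD 0 ' '
    let st' := if c = '}' then st + 1 else if c = '{' then st - 1 else st
    if st' = 0 then some 0 else none
  | (k+1), st =>
    let c := cs.getD (k+1) ' '
    let st' := if c = '}' then st + 1 else if c = '{' then st - 1 else st
    if st' = 0 then some (k+1) else fobGo cs k st'

-- find_opening_brace; none = the two 'raise ValueError' exits (unreachable under Pre_)
def find_opening_brace? (cs : List Char) (ci : Nat) : Option Nat :=
  if cs.getD ci ' ' ≠ '}' then none else fobGo cs ci 0

-- 'for i, char in enumerate(text)': structural recursion on the suffix with index i
def ffvGo (cs : List Char) : List Char → Nat → Int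
  | [], _ => -1
  | c :: rest, i =>
    if c = '}' then
      match find_opening_brace? cs i with
      | none => -2   -- Python: ValueError propagates; unreachable under Pre_
      | some j =>
        let obls : Int := PySem.Chars.rfindFrom cs ['\n'] 0 (some (j : Int)) + 1
        let cbls : Int := PySem.Chars.rfindFrom cs ['\n'] 0 (some (i : Int)) + 1
        if obls = cbls then ffvGo cs rest (i+1)
        else if PySem.Chars.strip (PySem.Chars.slice cs (some cbls) (some (i : Int))) = [] then
          ffvGo cs rest (i+1)
        else (i : Int)
    else ffvGo cs rest (i+1)

def find_first_valid_closing_brace (text : String) : Int :=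
  ffvGo text.toList text.toList 0

-- ===== PORT B =====
-- one forward pass; stack holds the line-start recorded when each unmatched '{' was seen
def altGo : List Char → Nat → List Nat → Nat → Bool → Int
  | [], _, _, _, _ => -1
  | c :: rest, i, stack, ls, hc =>
    if c = '\n' then altGo rest (i+1) stack (i+1) false
    else if c = '{' then altGo rest (i+1) (ls :: stack) ls (hc || !(PySem.Chars.isspace c))
    else if c = '}' then
      match stack with
      | [] => -2   -- Python: stack.pop() raises IndexError; unreachable under Pre_
      | ols :: st =>
        if ols ≠ ls ∧ hc then (i : Int)
        else altGo rest (i+1) st ls (hc || !(PySem.Chars.isspace c))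
    else altGo rest (i+1) stack ls (hc || !(PySem.Chars.isspace c))

def find_first_valid_closing_brace_alt (text : String) : Int :=
  altGo text.toList 0 [] 0 false

-- ===== PRECONDITION & SPEC =====
-- Helper counting formulas used only by Pre_ (properties of the text, not a run of either port):
-- prefix brace balance, start of the line containing index i, "j is the matching '{' of the '}' at i".
def pvBal (cs : List Char) (k : Nat) : Int :=
  ((cs.take k).count '{' : Int) - ((cs.take k).count '}' : Int)
def pvLineStart (cs : List Char) (i : Nat) : Nat :=
  i - ((cs.take i).reverse.takeWhile (fun c => c ≠ '\n')).length
def pvMatched (cs : List Char) (j i : Nat) : Prop :=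
  j < i ∧ cs.getD j ' ' = '{' ∧ pvBal cs j = pvBal cs (i+1) ∧
    ∀ k ≤ i, j < k → pvBal cs (i+1) < pvBal cs k
-- the '}' at i is matched, is reached before any unmatched '}', and A returns at it:
-- its '{' is on an earlier line and its own line has a non-whitespace character before it
def pvValidRet (cs : List Char) (i : Nat) : Prop :=
  cs.getD i ' ' = '}' ∧
  (∀ k ≤ i+1, (cs.take k).count '}' ≤ (cs.take k).count '{') ∧
  ∃ j < i, pvMatched cs j i ∧ '\n' ∈ (cs.drop j).take (i - j) ∧
    ¬ (((cs.drop (pvLineStart cs i)).take (i - pvLineStart cs i)).all PySem.Chars.isspace = true)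

-- Pre_ = exactly the texts on which Python A returns normally: either no unmatched '}' at all,
-- or some valid closing brace occurs before the first unmatched '}' (so A returns its index).
-- Outside Pre_ A raises ValueError (and B's stack.pop() raises IndexError at the same brace).
def Pre_find_first_valid_closing_brace (text : String) : Prop :=
  (∀ k ≤ text.toList.length, (text.toList.take k).count '}' ≤ (text.toList.take k).count '{')
  ∨ ∃ i < text.toList.length, pvValidRet text.toList i
instance (text : String) : Decidable (Pre_find_first_valid_closing_brace text) := by
  unfold Pre_find_first_valid_closing_brace pvValidRet pvMatched; infer_instance

def pvWitness_find_first_valid_closing_brace : String := "{\n a}\n{ b }"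

def Spec_find_first_valid_closing_brace (text : String) (out : Int) : Prop := out = find_first_valid_closing_brace_alt text
instance (text : String) (out : Int) : Decidable (Spec_find_first_valid_closing_brace text out) := by unfold Spec_find_first_valid_closing_brace; infer_instance

-- ===== CLAIM (what is proved, stated in full; the proofs are below) =====
def Claim_equal_find_first_valid_closing_brace : Prop := ∀ (text : String), Dom_find_first_valid_closing_brace text → Pre_find_first_valid_closing_brace text → Spec_find_first_valid_closing_brace text (find_first_valid_closing_brace text)

-- ===== LEMMAS AND PROOFS =====

-- reference state of B's loop after i characters
def openStack (cs : List Char) : Nat → List Nat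
  | 0 => []
  | i+1 =>
    let c := cs.getD i ' '
    if c = '{' then i :: openStack cs i
    else if c = '}' then (openStack cs i).tail
    else openStack cs i

def LSN (cs : List Char) : Nat → Nat
  | 0 => 0
  | i+1 => if cs.getD i ' ' = '\n' then i+1 else LSN cs i

def hcRef (cs : List Char) : Nat → Bool
  | 0 => false
  | i+1 =>
    if cs.getD i ' ' = '\n' then false
    else hcRef cs i || !(PySem.Chars.isspace (cs.getD i ' '))

lemma fobGo_succ (cs : List Char) (k : Nat) (st : Int) :
    fobGo cs (k+1) st =
      if (if cs.getD (k+1) ' ' = '}' then st + 1 else if cs.getD (k+1) ' ' = '{' then st - 1 else st) = 0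
      then some (k+1)
      else fobGo cs k (if cs.getD (k+1) ' ' = '}' then st + 1 else if cs.getD (k+1) ' ' = '{' then st - 1 else st) := rfl

lemma openStack_succ (cs : List Char) (i : Nat) :
    openStack cs (i+1) =
      if cs.getD i ' ' = '{' then i :: openStack cs i
      else if cs.getD i ' ' = '}' then (openStack cs i).tail
      else openStack cs i := rfl

lemma fobGo_eq (cs : List Char) : ∀ (i s : Nat),
    fobGo cs i ((s : Int) + 1) = (openStack cs (i+1))[s]? := by
  intro i
  induction i with
  | zero =>
    intro s
    rw [openStack_succ]
    simp only [fobGo]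
    by_cases h1 : cs.getD 0 ' ' = '}'
    · rw [h1]
      simp only [Char.reduceEq, reduceIte]
      rw [if_neg (show ¬((s:Int)+1+1 = 0) by omega)]
      simp [openStack]
    · by_cases h2 : cs.getD 0 ' ' = '{'
      · rw [h2]
        simp only [Char.reduceEq, reduceIte]
        rcases s with _ | t
        · norm_num [openStack]
        · rw [if_neg (show ¬(((t+1:Nat):Int)+1-1 = 0) by push_cast; omega)]
          simp [openStack]
      · simp only [if_neg h1, if_neg h2]
        rw [if_neg (show ¬((s:Int)+1 = 0) by omega)]
        simp [openStack]
  | succ k ih =>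
    intro s
    rw [fobGo_succ, openStack_succ]
    by_cases h1 : cs.getD (k+1) ' ' = '}'
    · rw [h1]
      simp only [Char.reduceEq, reduceIte]
      rw [if_neg (show ¬((s:Int)+1+1 = 0) by omega),
        show ((s:Int)+1)+1 = ((s+1 : Nat) : Int) + 1 by push_cast; ring, ih (s+1)]
      simp [List.getElem?_tail]
    · by_cases h2 : cs.getD (k+1) ' ' = '{'
      · rw [h2]
        simp only [Char.reduceEq, reduceIte]
        rcases s with _ | t
        · norm_num
        · rw [if_neg (show ¬(((t+1:Nat):Int)+1-1 = 0) by push_cast; omega),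
            show ((t+1 : Nat):Int) + 1 - 1 = ((t:Nat):Int)+1 by push_cast; ring, ih t]
          simp
      · simp only [if_neg h1, if_neg h2]
        rw [if_neg (show ¬((s:Int)+1 = 0) by omega), ih s]

lemma find_opening_eq' (cs : List Char) (i : Nat) (h : cs.getD i ' ' = '}') :
    (if cs.getD i ' ' ≠ '}' then none else fobGo cs i 0) = (openStack cs i)[0]? := by
  rw [if_neg (by rw [h]; simp)]
  cases i with
  | zero =>
    simp only [fobGo]
    rw [h]
    simp only [Char.reduceEq, reduceIte]
    norm_num [openStack]
  | succ k =>
    rw [fobGo_succ, h]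
    simp only [Char.reduceEq, reduceIte]
    rw [if_neg (by norm_num), show (0:Int)+1 = ((0:Nat):Int)+1 by norm_num, fobGo_eq cs k 0]

lemma openStack_mem_lt (cs : List Char) : ∀ i, ∀ j ∈ openStack cs i, j < i := by
  intro i
  induction i with
  | zero => simp [openStack]
  | succ k ih =>
    intro j hj
    rw [openStack_succ] at hj
    split_ifs at hj with h1 h2
    · rcases List.mem_cons.mp hj with h | h
      · omega
      · exact Nat.lt_succ_of_lt (ih j h)
    · exact Nat.lt_succ_of_lt (ih j (List.mem_of_mem_tail hj))
    · exact Nat.lt_succ_of_lt (ih j hj)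

lemma LSN_le (cs : List Char) : ∀ i, LSN cs i ≤ i := by
  intro i
  induction i with
  | zero => simp [LSN]
  | succ k ih =>
    simp only [LSN]
    split_ifs <;> omega

lemma singleton_isPrefixOf (a : Char) (xs : List Char) :
    [a].isPrefixOf xs = (xs[0]? == some a) := by
  cases xs with
  | nil => simp [List.isPrefixOf]
  | cons b bs => simp [List.isPrefixOf, BEq.comm]

lemma go_step (l : List Char) (k : Nat) :
    PySem.Chars.rfind.go l ['\n'] (k+1) =
      if l[k+1]? = some '\n' then ((k+1 : Nat) : Int) else PySem.Chars.rfind.go l ['\n'] k := by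
  show (if ['\n'].isPrefixOf (l.drop (k+1)) then ((k+1:Nat) : Int) else PySem.Chars.rfind.go l ['\n'] k) = _
  rw [singleton_isPrefixOf, List.getElem?_drop]
  simp only [Nat.add_zero]
  by_cases h : l[k+1]? = some '\n' <;> simp [h]

lemma go_zero (l : List Char) :
    PySem.Chars.rfind.go l ['\n'] 0 = if l[0]? = some '\n' then 0 else -1 := by
  show (if ['\n'].isPrefixOf l then (0:Int) else -1) = _
  rw [singleton_isPrefixOf]
  by_cases h : l[0]? = some '\n' <;> simp [h]

lemma LSN_succ (cs : List Char) (i : Nat) :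
    LSN cs (i+1) = if cs.getD i ' ' = '\n' then i+1 else LSN cs i := rfl

lemma getD_eq_iff (cs : List Char) (i : Nat) (a : Char) (ha : a ≠ ' ') :
    (cs.getD i ' ' = a) ↔ (cs[i]? = some a) := by
  rw [List.getD_eq_getElem?_getD]
  cases h : cs[i]? with
  | none => simpa using fun he => ha he.symm
  | some c => simp

lemma go_take (cs : List Char) (j : Nat) :
    ∀ k, k < j → PySem.Chars.rfind.go (cs.take j) ['\n'] k + 1 = (LSN cs (k+1) : Int) := by
  intro k
  induction k with
  | zero =>
    intro hk
    rw [go_zero, List.getElem?_take_of_lt hk, LSN_succ]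
    by_cases h : cs[0]? = some '\n'
    · rw [if_pos h, if_pos ((getD_eq_iff cs 0 '\n' (by decide)).mpr h)]
      norm_num
    · rw [if_neg h, if_neg (fun hc => h ((getD_eq_iff cs 0 '\n' (by decide)).mp hc))]
      simp [LSN]
  | succ t ih =>
    intro hk
    rw [go_step, List.getElem?_take_of_lt hk, LSN_succ]
    by_cases h : cs[t+1]? = some '\n'
    · rw [if_pos h, if_pos ((getD_eq_iff cs (t+1) '\n' (by decide)).mpr h)]
      push_cast; ring
    · rw [if_neg h, if_neg (fun hc => h ((getD_eq_iff cs (t+1) '\n' (by decide)).mp hc))]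
      exact ih (by omega)

lemma rfind_take (cs : List Char) (j : Nat) (hj : j ≤ cs.length) :
    PySem.Chars.rfind (cs.take j) ['\n'] + 1 = (LSN cs j : Int) := by
  show PySem.Chars.rfind.go (cs.take j) ['\n'] (cs.take j).length + 1 = _
  rw [List.length_take, Nat.min_eq_left hj]
  cases j with
  | zero => simp [go_zero, LSN]
  | succ t =>
    rw [go_step]
    rw [if_neg (by simp)]
    exact go_take cs (t+1) t (by omega)

lemma rfind_lineStart (cs : List Char) (j : Nat) (hj : j ≤ cs.length) :
    PySem.Chars.rfindFrom cs ['\n'] 0 (some (j : Int)) + 1 = (LSN cs j : Int) := by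
  show (let n : Int := cs.length;
        let e := if n < (j:Int) then n else if (j:Int) < 0 then (if (j:Int) + n < 0 then 0 else (j:Int) + n) else (j:Int);
        let st : Int := if (0:Int) < 0 then (if (0:Int) + n < 0 then 0 else 0 + n) else 0;
        if e < st then -1
        else
          let r := PySem.Chars.rfind (List.drop st.toNat (List.take e.toNat cs)) ['\n'];
          if r = -1 then -1 else st + r) + 1 = _
  simp only []
  rw [if_neg (show ¬((0:Int) < 0) by norm_num)]
  rw [if_neg (show ¬((cs.length:Int) < (j:Int)) by omega)]
  rw [if_neg (show ¬((j:Int) < 0) by omega)]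
  rw [if_neg (show ¬((j:Int) < 0) by omega)]
  rw [show ((0:Int).toNat) = 0 from rfl, List.drop_zero, Int.toNat_natCast]
  rw [← rfind_take cs j hj]
  by_cases hr : PySem.Chars.rfind (cs.take j) ['\n'] = -1
  · rw [if_pos hr, hr]
  · rw [if_neg hr]
    ring

lemma hcRef_succ (cs : List Char) (i : Nat) :
    hcRef cs (i+1) = if cs.getD i ' ' = '\n' then false
      else hcRef cs i || !(PySem.Chars.isspace (cs.getD i ' ')) := rfl

lemma dropWhile_eq_nil_iff' (p : Char → Bool) (l : List Char) :
    List.dropWhile p l = [] ↔ ∀ x ∈ l, p x := List.dropWhile_eq_nil_iff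

lemma all_dropWhile_iff (p : Char → Bool) (l : List Char) :
    (∀ x ∈ List.dropWhile p l, p x) ↔ ∀ x ∈ l, p x := by
  constructor
  · intro h x hx
    rcases (List.mem_append.mp (by rw [List.takeWhile_append_dropWhile]; exact hx :
        x ∈ List.takeWhile p l ++ List.dropWhile p l)) with h1 | h2
    · exact List.mem_takeWhile_imp h1
    · exact h x h2
  · intro h x hx
    exact h x (List.dropWhile_subset p hx)

lemma strip_eq_all (l : List Char) :
    (PySem.Chars.strip l = []) ↔ l.all PySem.Chars.isspace = true := by
  show (PySem.Chars.rstrip (PySem.Chars.lstrip l) = []) ↔ _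
  show ((List.dropWhile PySem.Chars.isspace (List.dropWhile PySem.Chars.isspace l).reverse).reverse = []) ↔ _
  rw [List.reverse_eq_nil_iff, dropWhile_eq_nil_iff']
  simp only [List.mem_reverse, List.all_eq_true]
  rw [all_dropWhile_iff]

lemma hcRef_eq (cs : List Char) : ∀ i ≤ cs.length,
    hcRef cs i = !((cs.drop (LSN cs i)).take (i - LSN cs i)).all PySem.Chars.isspace := by
  intro i
  induction i with
  | zero => simp [hcRef, LSN]
  | succ k ih =>
    intro hk
    have hkl : k < cs.length := by omega
    rw [hcRef_succ, LSN_succ]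
    by_cases h : cs.getD k ' ' = '\n'
    · rw [if_pos h, if_pos h]
      simp
    · rw [if_neg h, if_neg h, ih (by omega)]
      have hls : LSN cs k ≤ k := LSN_le cs k
      have hseg : (cs.drop (LSN cs k)).take (k + 1 - LSN cs k)
          = (cs.drop (LSN cs k)).take (k - LSN cs k) ++ [cs[k]] := by
        rw [show k + 1 - LSN cs k = (k - LSN cs k) + 1 by omega, List.take_add_one]
        have : (cs.drop (LSN cs k))[k - LSN cs k]? = some cs[k] := by
          rw [List.getElem?_drop, show LSN cs k + (k - LSN cs k) = k by omega,
            cs.getElem?_eq_getElem hkl]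
        rw [this]
        rfl
      rw [hseg, List.all_append]
      have hgd : cs.getD k ' ' = cs[k] := by
        simp [List.getD_eq_getElem?_getD, cs.getElem?_eq_getElem hkl]
      rw [hgd]
      simp

-- unfolding equations for the two loops
lemma ffvGo_cons (cs : List Char) (c : Char) (rest : List Char) (i : Nat) :
    ffvGo cs (c :: rest) i =
      if c = '}' then
        match find_opening_brace? cs i with
        | none => -2
        | some j =>
          if (PySem.Chars.rfindFrom cs ['\n'] 0 (some (j : Int)) + 1 : Int)
              = (PySem.Chars.rfindFrom cs ['\n'] 0 (some (i : Int)) + 1 : Int) then ffvGo cs rest (i+1)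
          else if PySem.Chars.strip (PySem.Chars.slice cs
              (some (PySem.Chars.rfindFrom cs ['\n'] 0 (some (i : Int)) + 1)) (some (i : Int))) = [] then
            ffvGo cs rest (i+1)
          else (i : Int)
      else ffvGo cs rest (i+1) := rfl

lemma altGo_cons (c : Char) (rest : List Char) (i : Nat) (stack : List Nat) (ls : Nat) (hc : Bool) :
    altGo (c :: rest) i stack ls hc =
      if c = '\n' then altGo rest (i+1) stack (i+1) false
      else if c = '{' then altGo rest (i+1) (ls :: stack) ls (hc || !(PySem.Chars.isspace c))
      else if c = '}' then
        match stack with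
        | [] => -2
        | ols :: st =>
          if ols ≠ ls ∧ hc then (i : Int)
          else altGo rest (i+1) st ls (hc || !(PySem.Chars.isspace c))
      else altGo rest (i+1) stack ls (hc || !(PySem.Chars.isspace c)) := rfl

lemma openStack_succ_other (cs : List Char) (i : Nat) (h1 : cs.getD i ' ' ≠ '{')
    (h2 : cs.getD i ' ' ≠ '}') : openStack cs (i+1) = openStack cs i := by
  rw [openStack_succ, if_neg h1, if_neg h2]

-- the joint loop invariant (unconditional: at an unmatched '}' both ports return the -2 sentinel)
lemma mainLoop (cs : List Char) :
    ∀ (rest : List Char) (i : Nat), cs.drop i = rest →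
      ffvGo cs rest i = altGo rest i ((openStack cs i).map (LSN cs)) (LSN cs i) (hcRef cs i) := by
  intro rest
  induction rest with
  | nil => intro i _; rfl
  | cons c rest' ih =>
    intro i hdrop
    have hi : i < cs.length := by
      by_contra hge
      rw [List.drop_eq_nil_of_le (by omega)] at hdrop
      exact (List.cons_ne_nil c rest') hdrop.symm
    have hget : cs[i]? = some c := by
      rw [← List.head?_drop, hdrop]; rfl
    have hgd : cs.getD i ' ' = c := by
      rw [List.getD_eq_getElem?_getD, hget]; rfl
    have hdrop' : cs.drop (i+1) = rest' := by
      rw [← List.tail_drop, hdrop]; rfl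
    rw [ffvGo_cons, altGo_cons]
    by_cases hnl : c = '\n'
    · rw [if_pos hnl, if_neg (by rw [hnl]; decide)]
      rw [ih (i+1) hdrop',
        openStack_succ_other cs i (by rw [hgd, hnl]; decide) (by rw [hgd, hnl]; decide),
        LSN_succ, if_pos (by rw [hgd, hnl]), hcRef_succ, if_pos (by rw [hgd, hnl])]
    · by_cases hob : c = '{'
      · rw [if_neg (by rw [hob]; decide), if_neg hnl, if_pos hob]
        rw [ih (i+1) hdrop', openStack_succ, hgd, if_pos hob,
          LSN_succ, if_neg (by rw [hgd]; exact hnl),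
          hcRef_succ, if_neg (by rw [hgd]; exact hnl), hgd]
        rfl
      · by_cases hcb : c = '}'
        · -- the closing-brace case
          rw [if_pos hcb, if_neg hnl, if_neg hob, if_pos hcb]
          have hgd' : cs.getD i ' ' = '}' := by rw [hgd, hcb]
          have h0 : find_opening_brace? cs i = (openStack cs i)[0]? :=
            find_opening_eq' cs i hgd'
          cases hs : openStack cs i with
          | nil =>
            -- Python A raises ValueError, Python B raises IndexError: both ports return -2
            rw [h0, hs]
            rfl
          | cons j t =>
            have hfo : find_opening_brace? cs i = some j := by rw [h0, hs]; rfl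
            have hjlt : j < i := openStack_mem_lt cs i j (by rw [hs]; exact List.mem_cons_self)
            rw [hfo]
            simp only [List.map_cons]
            rw [rfind_lineStart cs j (by omega), rfind_lineStart cs i (by omega)]
            -- next-state facts shared by both continue branches
            have hos' : openStack cs (i+1) = t := by
              rw [openStack_succ, hgd', if_neg (by decide), if_pos rfl, hs]; rfl
            have hls' : LSN cs (i+1) = LSN cs i := by
              rw [LSN_succ, if_neg (by rw [hgd']; decide)]
            have hhc' : hcRef cs (i+1) = (hcRef cs i || !(PySem.Chars.isspace c)) := by
              rw [hcRef_succ, if_neg (by rw [hgd]; exact hnl), hgd]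
            have hstrip : (PySem.Chars.strip (PySem.Chars.slice cs
                (some ((LSN cs i : Nat) : Int)) (some (i : Int))) = []) ↔ hcRef cs i = false := by
              rw [show PySem.Chars.slice cs (some ((LSN cs i : Nat) : Int)) (some (i : Int))
                  = (cs.drop (LSN cs i)).take (i - LSN cs i) by
                rw [PySem.Chars.slice_eq_listSlice, PySem.List.slice_natCast]]
              rw [strip_eq_all, hcRef_eq cs i (by omega)]
              cases hall : ((cs.drop (LSN cs i)).take (i - LSN cs i)).all PySem.Chars.isspace <;> simp
            by_cases heq : LSN cs j = LSN cs i
            · rw [if_pos (by exact_mod_cast heq),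
                if_neg (by simp [heq])]
              rw [ih (i+1) hdrop', hos', hls', hhc']
            · rw [if_neg (by exact_mod_cast heq)]
              by_cases hhc : hcRef cs i = true
              · rw [if_neg (by rw [hstrip, hhc]; simp), if_pos ⟨by simpa using heq, hhc⟩]
              · rw [if_pos (hstrip.mpr (by simpa using hhc)),
                  if_neg (by simp [hhc]),
                  ih (i+1) hdrop', hos', hls', hhc']
        · -- ordinary character
          rw [if_neg hcb, if_neg hnl, if_neg hob, if_neg hcb]
          rw [ih (i+1) hdrop', openStack_succ_other cs i (by rw [hgd]; exact hob)
              (by rw [hgd]; exact hcb),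
            LSN_succ, if_neg (by rw [hgd]; exact hnl), hcRef_succ,
            if_neg (by rw [hgd]; exact hnl), hgd]

-- ===== VERDICT (by name: the statement is the Claim_ definition above) =====
theorem find_first_valid_closing_brace_spec : Claim_equal_find_first_valid_closing_brace := by
  intro text _ _
  unfold Spec_find_first_valid_closing_brace find_first_valid_closing_brace find_first_valid_closing_brace_alt
  simpa [openStack, LSN, hcRef] using (mainLoop text.toList text.toList 0 rfl)
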